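-- pv_equiv track=rewrite | github.com/sanchitmonga22/Python-Programming | Spellotron/spellotron.py | replace_with_adjacent
-- ===== SOURCE A (Python) =====
-- def replace_with_adjacent(dct, word, lst):
--     """
--     This function replaces a letter with its adjacent keys and checks whether the word makes any sense or not
--     :param dct:dictionary containing the letters and its adjacent letters
--     :param word: word that is to be corrected
--     :param lst:lst of all the correct words in the dictionary
--     :return:returns true along with the corrected word if the word was corrected
--     """
--     l = probable2(len(word), lst)  # storing the list of probable words
--     for i in range(len(word)):  # iterating through each character of the word
--         for new_word in l:  # iterating through the length of the word
--             if (ord(word[i]) < 97 or ord(word[i]) > 122):  # if the word is not a lower case alphabet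
--                 break
--             else:  # only if the given character is a lower case alphabet
--                 b = new_word[i] in dct[word[i]]  # checks whether the letter is found in the list of adjacent letters to the key
--                 if word[i] != new_word[i] and b and word[0:i] == new_word[0:i] and word[i + 1:] == new_word[i + 1:]:  # if the word is not same and only and only one letter of the word does not match
--                     b = False
--                     return True, new_word  # returns the corrected word
--     return False, ""
--
-- def probable2(len1, lst):
--     """
--     checks and returns the words with the similar length
--     :param len1: Length of the word that has to be returned
--     :param lst: the list that has to be checked from
--     :return:Returns a list of words that have the same length as len1
--     """
--     l1 = []
--     for i in lst:
--         if len(i) == len1:  # checking whether the word has the same length or not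
--             l1.append(i)
--     return l1
-- ===== SOURCE B (Python) =====
-- def replace_with_adjacent(dct, word, lst):
--     """
--     Single pass over the candidate list: for each word of the same length, one
--     scan finds its unique differing position (if any); keep the candidate with
--     the smallest such position (earliest in the list on ties).
--     Letters absent from the adjacency map are treated as having no adjacent keys.
--     """
--     n = len(word)
--     best_pos = None
--     best_word = ""
--     for w in lst:
--         if len(w) != n:
--             continue
--         p = -1
--         ok = True
--         for j in range(n):
--             if word[j] != w[j]:
--                 if p != -1:
--                     ok = False
--                     break
--                 p = j
--         if not ok or p == -1:
--             continue
--         c = word[p]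
--         if 97 <= ord(c) <= 122 and w[p] in dct.get(c, []):
--             if best_pos is None or p < best_pos:
--                 best_pos = p
--                 best_word = w
--     if best_pos is None:
--         return False, ""
--     return True, best_word
-- ===== Notes on version B (the rewrite author's own statement) =====
-- stated objective: alternative
-- what changed: Replaced A's position-major double loop (for each position of the word, rescan all same-length candidates, comparing prefix/suffix slices) by one pass over the candidate list that finds each candidate's unique differing position in a single scan and keeps the candidate with the smallest (position, list index).
import Mathlib
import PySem

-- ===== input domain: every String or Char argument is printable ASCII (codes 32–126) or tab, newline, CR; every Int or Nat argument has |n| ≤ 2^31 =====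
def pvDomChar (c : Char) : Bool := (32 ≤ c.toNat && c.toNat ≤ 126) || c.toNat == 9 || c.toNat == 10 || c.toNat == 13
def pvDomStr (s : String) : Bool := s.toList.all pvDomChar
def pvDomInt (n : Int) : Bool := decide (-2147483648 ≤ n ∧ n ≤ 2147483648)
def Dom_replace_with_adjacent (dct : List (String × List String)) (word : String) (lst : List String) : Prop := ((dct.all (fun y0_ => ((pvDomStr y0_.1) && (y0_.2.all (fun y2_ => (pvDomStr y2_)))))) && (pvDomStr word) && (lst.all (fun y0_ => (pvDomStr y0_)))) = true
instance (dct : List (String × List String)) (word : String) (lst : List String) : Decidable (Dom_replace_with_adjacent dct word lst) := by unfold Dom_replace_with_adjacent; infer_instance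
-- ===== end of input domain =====

-- B replaces A's position-major double loop (rescanning all same-length candidates at each
-- position, with slice comparisons) by one diff-position scan per candidate, keeping the
-- candidate with the smallest (diff position, list index); objective: alternative.

-- ===== PORT A =====
-- probable2: the Python accumulator loop appending words of length len1
def probable2 (len1 : Int) (lst : List String) : List String :=
  lst.foldl (fun l1 i => if (i.toList.length : Int) = len1 then l1 ++ [i] else l1) []

-- the inner 'for new_word in l' loop at position i; 'break' on a non-lowercase word[i] = none,
-- the early 'return True, new_word' = some new_word.
-- word[i]/new_word[i] are ported as List.getD on toList (i < length at every call site, so exact);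
-- word[0:i] / word[i+1:] are ported as take/drop (exact for 0 ≤ i);
-- dct[word[i]] is ported with Dict.getD (exact under Pre_, which excludes the KeyError inputs).
def pvInnerA (dct : List (String × List String)) (cs : List Char) (i : Nat) : List String → Option String
  | [] => none
  | w :: rest =>
    if (cs.getD i ' ').toNat < 97 ∨ 122 < (cs.getD i ' ').toNat then none
    else
      let b := String.singleton (w.toList.getD i ' ') ∈
        PySem.Dict.getD (PySem.Dict.mk dct) (String.singleton (cs.getD i ' ')) []
      if cs.getD i ' ' ≠ w.toList.getD i ' ' ∧ b ∧ cs.take i = w.toList.take i ∧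
         cs.drop (i+1) = w.toList.drop (i+1)
      then some w
      else pvInnerA dct cs i rest

-- the outer 'for i in range(len(word))' loop (range(n) = List.range n, exact)
def pvOuterA (dct : List (String × List String)) (cs : List Char) (cands : List String) :
    List Nat → Option String
  | [] => none
  | i :: is =>
    match pvInnerA dct cs i cands with
    | some w => some w
    | none => pvOuterA dct cs cands is

def replace_with_adjacent (dct : List (String × List String)) (word : String) (lst : List String) :
    Bool × String :=
  let l := probable2 (word.toList.length : Int) lst
  match pvOuterA dct word.toList l (List.range word.toList.length) with
  | some w => (true, w)
  | none => (false, "")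

-- ===== PORT B =====
-- the inner 'for j in range(n)' scan of Source B: state p (none = -1); the 'ok = False; break'
-- exit and the p == -1 exit are both 'continue' in Source B, so both are none here
def pvScanB (cs ys : List Char) : List Nat → Option Nat → Option Nat
  | [], p => p
  | j :: js, p =>
    if cs.getD j ' ' = ys.getD j ' ' then pvScanB cs ys js p
    else
      match p with
      | none => pvScanB cs ys js (some j)
      | some _ => none

-- the 'for w in lst' loop of Source B with state best = (best_pos, best_word) (none = best_pos is None)
def pvFoldB (dct : List (String × List String)) (cs : List Char) :
    List String → Option (Nat × String) → Option (Nat × String)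
  | [], best => best
  | w :: rest, best =>
    if w.toList.length ≠ cs.length then pvFoldB dct cs rest best
    else
      match pvScanB cs w.toList (List.range cs.length) none with
      | none => pvFoldB dct cs rest best
      | some p =>
        if 97 ≤ (cs.getD p ' ').toNat ∧ (cs.getD p ' ').toNat ≤ 122 ∧
           String.singleton (w.toList.getD p ' ') ∈
             PySem.Dict.getD (PySem.Dict.mk dct) (String.singleton (cs.getD p ' ')) []
        then
          match best with
          | none => pvFoldB dct cs rest (some (p, w))
          | some (bp, bw) =>
            if p < bp then pvFoldB dct cs rest (some (p, w)) else pvFoldB dct cs rest (some (bp, bw))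
        else pvFoldB dct cs rest best

def replace_with_adjacent_alt (dct : List (String × List String)) (word : String)
    (lst : List String) : Bool × String :=
  match pvFoldB dct word.toList lst none with
  | none => (false, "")
  | some (_, w) => (true, w)

-- ===== PRECONDITION & SPEC =====
-- Pre_ excludes exactly the inputs on which the Python A raises KeyError: some same-length
-- candidate exists and some lowercase position i of word is missing from dct while no
-- correction is found at any earlier position.  A returns normally everywhere else.
def Pre_replace_with_adjacent (dct : List (String × List String)) (word : String)
    (lst : List String) : Prop :=
  ¬ (
  (∃ w ∈ lst, w.toList.length = word.toList.length) ∧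
  ∃ i ∈ List.range word.toList.length,
    (97 ≤ (word.toList.getD i ' ').toNat ∧ (word.toList.getD i ' ').toNat ≤ 122) ∧
    (PySem.Dict.get? (PySem.Dict.mk dct) (String.singleton (word.toList.getD i ' '))) = none ∧
    ∀ j ∈ List.range i,
      ¬ ((97 ≤ (word.toList.getD j ' ').toNat ∧ (word.toList.getD j ' ').toNat ≤ 122) ∧
         ∃ w ∈ lst, w.toList.length = word.toList.length ∧
           word.toList.getD j ' ' ≠ w.toList.getD j ' ' ∧
           word.toList.take j = w.toList.take j ∧
           word.toList.drop (j+1) = w.toList.drop (j+1) ∧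
           String.singleton (w.toList.getD j ' ') ∈
             PySem.Dict.getD (PySem.Dict.mk dct) (String.singleton (word.toList.getD j ' ')) []))

instance (dct : List (String × List String)) (word : String) (lst : List String) :
    Decidable (Pre_replace_with_adjacent dct word lst) := by
  unfold Pre_replace_with_adjacent; infer_instance

def pvWitness_replace_with_adjacent : (List (String × List String)) × String × List String :=
  ([("a", ["b"])], "ax", ["bx"])

def Spec_replace_with_adjacent (dct : List (String × List String)) (word : String)
    (lst : List String) (out : Bool × String) : Prop := out = replace_with_adjacent_alt dct word lst
instance (dct : List (String × List String)) (word : String) (lst : List String)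
    (out : Bool × String) : Decidable (Spec_replace_with_adjacent dct word lst out) := by
  unfold Spec_replace_with_adjacent; infer_instance

-- ===== CLAIM (what is proved, stated in full; the proofs are below) =====
def Claim_equal_replace_with_adjacent : Prop := ∀ (dct : List (String × List String)) (word : String) (lst : List String), Dom_replace_with_adjacent dct word lst → Pre_replace_with_adjacent dct word lst → Spec_replace_with_adjacent dct word lst (replace_with_adjacent dct word lst)

-- ===== LEMMAS AND PROOFS =====

-- The candidate-index condition of A's inner loop at position i (excluding the lowercase break)
def pvCondA (dct : List (String × List String)) (cs : List Char) (i : Nat) (w : String) : Bool :=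
  decide (cs.getD i ' ' ≠ w.toList.getD i ' ' ∧
    String.singleton (w.toList.getD i ' ') ∈
      PySem.Dict.getD (PySem.Dict.mk dct) (String.singleton (cs.getD i ' ')) [] ∧
    cs.take i = w.toList.take i ∧ cs.drop (i+1) = w.toList.drop (i+1))

-- The per-candidate verdict of B: the unique differing position, if it qualifies
def pvGoodAt (dct : List (String × List String)) (cs : List Char) (w : String) : Option Nat :=
  if w.toList.length = cs.length then
    match pvScanB cs w.toList (List.range cs.length) none with
    | some p =>
      if 97 ≤ (cs.getD p ' ').toNat ∧ (cs.getD p ' ').toNat ≤ 122 ∧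
         String.singleton (w.toList.getD p ' ') ∈
           PySem.Dict.getD (PySem.Dict.mk dct) (String.singleton (cs.getD p ' ')) []
      then some p else none
    | none => none
  else none

def pvComb (p : Nat) (w0 : String) : Option (Nat × String) → Option (Nat × String)
  | none => some (p, w0)
  | some (q, u) => if p ≤ q then some (p, w0) else some (q, u)

-- the (position, first index) minimum of the candidate list
def pvM (dct : List (String × List String)) (cs : List Char) : List String → Option (Nat × String)
  | [] => none
  | w :: r =>
    match pvGoodAt dct cs w with
    | none => pvM dct cs r
    | some p => pvComb p w (pvM dct cs r)

def pvMerge : Option (Nat × String) → Option (Nat × String) → Option (Nat × String)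
  | none, m => m
  | some b, none => some b
  | some (bp, bw), some qu => if qu.1 < bp then some qu else some (bp, bw)

lemma pvM_cons (dct : List (String × List String)) (cs : List Char) (w : String)
    (r : List String) :
    pvM dct cs (w :: r) =
      match pvGoodAt dct cs w with
      | none => pvM dct cs r
      | some p => pvComb p w (pvM dct cs r) := rfl

lemma merge_comb (p : Nat) (w : String) (m : Option (Nat × String)) :
    pvMerge (some (p, w)) m = pvComb p w m := by
  cases m with
  | none => rfl
  | some qu =>
    obtain ⟨q, u⟩ := qu
    simp only [pvMerge, pvComb]
    first | rfl | (split_ifs <;> first | rfl | omega)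

lemma merge_comb2 (p bp : Nat) (w bw : String) (m : Option (Nat × String)) :
    (if p < bp then pvMerge (some (p, w)) m else pvMerge (some (bp, bw)) m) =
      pvMerge (some (bp, bw)) (pvComb p w m) := by
  cases m with
  | none =>
    simp only [pvComb, pvMerge]
  | some qu =>
    obtain ⟨q, u⟩ := qu
    simp only [pvComb]
    by_cases h1 : p ≤ q
    · rw [if_pos h1]
      simp only [pvMerge]
      split_ifs <;> first | rfl | omega
    · rw [if_neg h1]
      simp only [pvMerge]
      split_ifs <;> first | rfl | omega

lemma foldB_eq (dct : List (String × List String)) (cs : List Char) :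
    ∀ (ws : List String) (best : Option (Nat × String)),
      pvFoldB dct cs ws best = pvMerge best (pvM dct cs ws) := by
  intro ws
  induction ws with
  | nil => intro best; cases best <;> rfl
  | cons w r ih =>
    intro best
    rw [pvFoldB, pvM_cons]
    by_cases hl : w.toList.length = cs.length
    · rw [if_neg (by simp [hl])]
      cases hscan : pvScanB cs w.toList (List.range cs.length) none with
      | none => simp only [pvGoodAt, if_pos hl, hscan, ih]
      | some p =>
        by_cases hcond : 97 ≤ (cs.getD p ' ').toNat ∧ (cs.getD p ' ').toNat ≤ 122 ∧
            String.singleton (w.toList.getD p ' ') ∈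
              PySem.Dict.getD (PySem.Dict.mk dct) (String.singleton (cs.getD p ' ')) []
        · simp only [pvGoodAt, if_pos hl, hscan, if_pos hcond]
          cases best with
          | none => rw [ih, merge_comb]; rfl
          | some bpw =>
            obtain ⟨bp, bw⟩ := bpw
            show (if p < bp then pvFoldB dct cs r (some (p, w))
                  else pvFoldB dct cs r (some (bp, bw))) = _
            rw [← merge_comb2 p bp w bw (pvM dct cs r)]
            by_cases hlt : p < bp
            · rw [if_pos hlt, if_pos hlt, ih]
            · rw [if_neg hlt, if_neg hlt, ih]
        · simp only [pvGoodAt, if_pos hl, hscan, if_neg hcond, ih]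
    · rw [if_pos hl, ih]
      simp only [pvGoodAt, if_neg hl]

lemma scanB_keep (cs ys : List Char) :
    ∀ (js : List Nat) (q : Nat),
      pvScanB cs ys js (some q) =
        if ∀ j ∈ js, cs.getD j ' ' = ys.getD j ' ' then some q else none := by
  intro js
  induction js with
  | nil => intro q; simp [pvScanB]
  | cons j js ih =>
    intro q
    rw [pvScanB]
    by_cases heq : cs.getD j ' ' = ys.getD j ' '
    · rw [if_pos heq, ih]
      by_cases hall : ∀ j ∈ js, cs.getD j ' ' = ys.getD j ' '
      · rw [if_pos hall, if_pos ((List.forall_mem_cons (p := fun i => cs.getD i ' ' = ys.getD i ' ') (a := j) (l := js)).mpr ⟨heq, hall⟩)]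
      · rw [if_neg hall, if_neg (fun h => hall ((List.forall_mem_cons (p := fun i => cs.getD i ' ' = ys.getD i ' ') (a := j) (l := js)).mp h).2)]
    · rw [if_neg heq]
      show (none : Option Nat) = _
      rw [if_neg (fun h => heq ((List.forall_mem_cons (p := fun i => cs.getD i ' ' = ys.getD i ' ') (a := j) (l := js)).mp h).1)]

lemma scanB_some_iff (cs ys : List Char) :
    ∀ (js : List Nat), js.Nodup → ∀ (p : Nat),
      (pvScanB cs ys js none = some p ↔
        (p ∈ js ∧ cs.getD p ' ' ≠ ys.getD p ' ' ∧
         ∀ j ∈ js, cs.getD j ' ' ≠ ys.getD j ' ' → j = p)) := by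
  intro js
  induction js with
  | nil => intro _ p; simp [pvScanB]
  | cons j js ih =>
    intro hnd p
    rw [List.nodup_cons] at hnd
    obtain ⟨hj, hnd2⟩ := hnd
    by_cases heq : cs.getD j ' ' = ys.getD j ' '
    · rw [show pvScanB cs ys (j :: js) none = pvScanB cs ys js none from by
        rw [pvScanB, if_pos heq], ih hnd2 p]
      constructor
      · rintro ⟨pm, dp, hall⟩
        refine ⟨List.mem_cons_of_mem _ pm, dp, ?_⟩
        intro i hi hd
        rcases List.mem_cons.mp hi with rfl | hi'
        · exact absurd heq hd
        · exact hall i hi' hd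
      · rintro ⟨pm, dp, hall⟩
        rcases List.mem_cons.mp pm with rfl | pm'
        · exact absurd heq dp
        · exact ⟨pm', dp, fun i hi hd => hall i (List.mem_cons_of_mem _ hi) hd⟩
    · rw [show pvScanB cs ys (j :: js) none = pvScanB cs ys js (some j) from by
        rw [pvScanB, if_neg heq], scanB_keep cs ys js j]
      by_cases hall : ∀ i ∈ js, cs.getD i ' ' = ys.getD i ' '
      · rw [if_pos hall]
        constructor
        · rintro h
          injection h with h
          subst h
          refine ⟨List.mem_cons_self, heq, ?_⟩
          intro i hi hd
          rcases List.mem_cons.mp hi with rfl | hi'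
          · rfl
          · exact absurd (hall i hi') hd
        · rintro ⟨pm, dp, _⟩
          rcases List.mem_cons.mp pm with rfl | pm'
          · rfl
          · exact absurd (hall p pm') dp
      · rw [if_neg hall]
        rw [not_forall] at hall
        obtain ⟨i0, h0⟩ := hall
        rw [Classical.not_imp] at h0
        obtain ⟨hi0, hd0⟩ := h0
        constructor
        · intro h; exact absurd h (by simp)
        · rintro ⟨pm, dp, hprop⟩
          have h1 : i0 = p := hprop i0 (List.mem_cons_of_mem _ hi0) hd0
          have h2 : j = p := hprop j List.mem_cons_self heq
          exact absurd (h2 ▸ h1 ▸ hi0) hj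

lemma take_eq_iff (cs ys : List Char) (hlen : ys.length = cs.length) (i : Nat) :
    cs.take i = ys.take i ↔ ∀ j, j < i → cs.getD j ' ' = ys.getD j ' ' := by
  constructor
  · intro h j hj
    have := congrArg (fun l => l[j]?) h
    simp only [List.getElem?_take, if_pos hj] at this
    simp [List.getD_eq_getElem?_getD, this]
  · intro h
    apply List.ext_getElem?_iff.mpr
    intro m
    rw [List.getElem?_take, List.getElem?_take]
    by_cases hm : m < i
    · rw [if_pos hm, if_pos hm]
      have hgd := h m hm
      rw [List.getD_eq_getElem?_getD, List.getD_eq_getElem?_getD] at hgd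
      by_cases hlt : m < cs.length
      · rw [List.getElem?_eq_getElem hlt, List.getElem?_eq_getElem (by omega : m < ys.length)]
        rw [List.getElem?_eq_getElem hlt, List.getElem?_eq_getElem (by omega : m < ys.length)] at hgd
        simpa using hgd
      · rw [List.getElem?_eq_none (by omega), List.getElem?_eq_none (by omega)]
    · rw [if_neg hm, if_neg hm]

lemma drop_eq_iff (cs ys : List Char) (hlen : ys.length = cs.length) (k : Nat) :
    cs.drop k = ys.drop k ↔ ∀ j, k ≤ j → cs.getD j ' ' = ys.getD j ' ' := by
  constructor
  · intro h j hj
    have := congrArg (fun l => l[j - k]?) h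
    simp only [List.getElem?_drop] at this
    rw [show k + (j - k) = j from by omega] at this
    simp [List.getD_eq_getElem?_getD, this]
  · intro h
    apply List.ext_getElem?_iff.mpr
    intro m
    rw [List.getElem?_drop, List.getElem?_drop]
    have hgd := h (k + m) (by omega)
    rw [List.getD_eq_getElem?_getD, List.getD_eq_getElem?_getD] at hgd
    by_cases hlt : k + m < cs.length
    · rw [List.getElem?_eq_getElem hlt, List.getElem?_eq_getElem (by omega : k + m < ys.length)]
      rw [List.getElem?_eq_getElem hlt, List.getElem?_eq_getElem (by omega : k + m < ys.length)] at hgd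
      simpa using hgd
    · rw [List.getElem?_eq_none (by omega), List.getElem?_eq_none (by omega)]

lemma condA_scan (dct : List (String × List String)) (cs : List Char) (w : String)
    (hlen : w.toList.length = cs.length) (i : Nat) (hc : pvCondA dct cs i w = true) :
    pvScanB cs w.toList (List.range cs.length) none = some i := by
  rw [pvCondA, decide_eq_true_iff] at hc
  obtain ⟨hne, _, htake, hdrop⟩ := hc
  have hi : i < cs.length := by
    by_contra h
    apply hne
    rw [List.getD_eq_getElem?_getD, List.getD_eq_getElem?_getD,
        List.getElem?_eq_none (by omega : cs.length ≤ i),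
        List.getElem?_eq_none (show w.toList.length ≤ i by rw [hlen]; omega)]
  rw [scanB_some_iff cs w.toList (List.range cs.length) List.nodup_range i]
  refine ⟨List.mem_range.mpr hi, hne, ?_⟩
  intro j hj hd
  by_contra hne2
  rcases Nat.lt_or_ge j i with h1 | h2
  · exact hd ((take_eq_iff cs w.toList hlen i).mp htake j h1)
  · exact hd ((drop_eq_iff cs w.toList hlen (i + 1)).mp hdrop j (by omega))

lemma scan_unique (cs : List Char) (w : String) (hlen : w.toList.length = cs.length) (p : Nat)
    (hsc : pvScanB cs w.toList (List.range cs.length) none = some p) :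
    p < cs.length ∧ cs.getD p ' ' ≠ w.toList.getD p ' ' ∧
      cs.take p = w.toList.take p ∧ cs.drop (p + 1) = w.toList.drop (p + 1) := by
  rw [scanB_some_iff cs w.toList (List.range cs.length) List.nodup_range p] at hsc
  obtain ⟨pm, dp, huniq⟩ := hsc
  have hp : p < cs.length := List.mem_range.mp pm
  refine ⟨hp, dp, ?_, ?_⟩
  · rw [take_eq_iff cs w.toList hlen]
    intro j hj
    by_contra hd
    have := huniq j (List.mem_range.mpr (by omega)) hd
    omega
  · rw [drop_eq_iff cs w.toList hlen]
    intro j hj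
    by_contra hd
    by_cases hjn : j < cs.length
    · have := huniq j (List.mem_range.mpr hjn) hd
      omega
    · apply hd
      rw [List.getD_eq_getElem?_getD, List.getD_eq_getElem?_getD,
          List.getElem?_eq_none (by omega : cs.length ≤ j),
          List.getElem?_eq_none (show w.toList.length ≤ j by rw [hlen]; omega)]

lemma goodAt_iff (dct : List (String × List String)) (cs : List Char) (w : String)
    (hlen : w.toList.length = cs.length) (i : Nat) :
    pvGoodAt dct cs w = some i ↔
      ((97 ≤ (cs.getD i ' ').toNat ∧ (cs.getD i ' ').toNat ≤ 122) ∧ pvCondA dct cs i w = true) := by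
  rw [pvGoodAt, if_pos hlen]
  cases hscan : pvScanB cs w.toList (List.range cs.length) none with
  | none =>
    constructor
    · intro h; exact absurd h (by simp)
    · rintro ⟨_, hcond⟩
      exact absurd ((condA_scan dct cs w hlen i hcond).symm.trans hscan) (by simp)
  | some p =>
    show (if _ then some p else none) = some i ↔ _
    constructor
    · intro h
      by_cases hc3 : 97 ≤ (cs.getD p ' ').toNat ∧ (cs.getD p ' ').toNat ≤ 122 ∧
          String.singleton (w.toList.getD p ' ') ∈
            PySem.Dict.getD (PySem.Dict.mk dct) (String.singleton (cs.getD p ' ')) []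
      · rw [if_pos hc3] at h
        injection h with h
        subst h
        obtain ⟨_, hne, htake, hdrop⟩ := scan_unique cs w hlen p hscan
        exact ⟨⟨hc3.1, hc3.2.1⟩, by
          rw [pvCondA, decide_eq_true_iff]
          exact ⟨hne, hc3.2.2, htake, hdrop⟩⟩
      · rw [if_neg hc3] at h
        exact absurd h (by simp)
    · rintro ⟨hlow, hcond⟩
      have hsc := condA_scan dct cs w hlen i hcond
      rw [hscan] at hsc
      injection hsc with hsc
      subst hsc
      have hcond2 := hcond
      rw [pvCondA, decide_eq_true_iff] at hcond2
      rw [if_pos ⟨hlow.1, hlow.2, hcond2.2.1⟩]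

lemma innerA_eq_find (dct : List (String × List String)) (cs : List Char) (i : Nat) :
    ∀ cands : List String,
      pvInnerA dct cs i cands =
        if (cs.getD i ' ').toNat < 97 ∨ 122 < (cs.getD i ' ').toNat then none
        else cands.find? (pvCondA dct cs i) := by
  intro cands
  induction cands with
  | nil => rw [pvInnerA]; split_ifs <;> rfl
  | cons w rest ih =>
    rw [pvInnerA]
    by_cases hlow : (cs.getD i ' ').toNat < 97 ∨ 122 < (cs.getD i ' ').toNat
    · rw [if_pos hlow, if_pos hlow]
    · rw [if_neg hlow, if_neg hlow]
      show (if cs.getD i ' ' ≠ w.toList.getD i ' ' ∧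
              String.singleton (w.toList.getD i ' ') ∈
                PySem.Dict.getD (PySem.Dict.mk dct) (String.singleton (cs.getD i ' ')) [] ∧
              cs.take i = w.toList.take i ∧ cs.drop (i + 1) = w.toList.drop (i + 1)
            then some w else pvInnerA dct cs i rest) = _
      by_cases hc : cs.getD i ' ' ≠ w.toList.getD i ' ' ∧
          String.singleton (w.toList.getD i ' ') ∈
            PySem.Dict.getD (PySem.Dict.mk dct) (String.singleton (cs.getD i ' ')) [] ∧
          cs.take i = w.toList.take i ∧ cs.drop (i + 1) = w.toList.drop (i + 1)
      · rw [if_pos hc, List.find?_cons_of_pos (by rw [pvCondA]; exact decide_eq_true hc)]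
      · rw [if_neg hc, ih, if_neg hlow,
            List.find?_cons_of_neg (by rw [pvCondA, decide_eq_true_iff]; exact hc)]

def pvF (dct : List (String × List String)) (cs : List Char) (cands : List String)
    (js : List Nat) : Option (Nat × String) :=
  js.findSome? (fun i => (pvInnerA dct cs i cands).map (fun w => (i, w)))

lemma findSome?_pos_mem (f : Nat → Option (Nat × String))
    (hf : ∀ i q u, f i = some (q, u) → q = i) :
    ∀ (js : List Nat) (q : Nat) (u : String), js.findSome? f = some (q, u) → q ∈ js := by
  intro js
  induction js with
  | nil => intro q u h; simp at h
  | cons j js ih =>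
    intro q u h
    rw [List.findSome?_cons] at h
    cases hfj : f j with
    | some v =>
      rw [hfj] at h
      injection h with h
      subst h
      exact (hf j q u hfj) ▸ List.mem_cons_self
    | none =>
      rw [hfj] at h
      exact List.mem_cons_of_mem _ (ih q u h)

lemma findSome?_update (p : Nat) (w0 : String) (f g : Nat → Option (Nat × String))
    (hf : ∀ i q u, f i = some (q, u) → q = i) :
    ∀ js : List Nat, js.Pairwise (· < ·) → p ∈ js →
      (∀ i ∈ js, g i = if i = p then some (p, w0) else f i) →
      js.findSome? g = pvComb p w0 (js.findSome? f) := by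
  intro js
  induction js with
  | nil => intro _ hp; simp at hp
  | cons j js ih =>
    intro hpw hp hg
    rw [List.pairwise_cons] at hpw
    obtain ⟨hjlt, hpw2⟩ := hpw
    rw [List.findSome?_cons, List.findSome?_cons]
    by_cases hjp : j = p
    · subst hjp
      rw [hg j List.mem_cons_self, if_pos rfl]
      cases hfj : f j with
      | some v =>
        obtain ⟨q, u⟩ := v
        have : q = j := hf j q u hfj
        subst this
        show some (q, w0) = pvComb q w0 (some (q, u))
        rw [pvComb, if_pos (Nat.le_refl q)]
      | none =>
        cases hrest : js.findSome? f with
        | none => rfl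
        | some v =>
          obtain ⟨q, u⟩ := v
          have hqm : q ∈ js := findSome?_pos_mem f hf js q u hrest
          show some (j, w0) = pvComb j w0 (some (q, u))
          rw [pvComb, if_pos (Nat.le_of_lt (hjlt q hqm))]
    · have hpj : p ∈ js := by
        rcases List.mem_cons.mp hp with h | h
        · exact absurd h.symm hjp
        · exact h
      rw [hg j List.mem_cons_self, if_neg hjp]
      cases hfj : f j with
      | some v =>
        obtain ⟨q, u⟩ := v
        have hqj : q = j := hf j q u hfj
        subst hqj
        show some (q, u) = pvComb p w0 (some (q, u))
        rw [pvComb, if_neg (by have := hjlt p hpj; omega)]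
      | none =>
        exact ih hpw2 hpj (fun i hi => hg i (List.mem_cons_of_mem _ hi))

lemma findSome?_congr {α β : Type} (f g : α → Option β) :
    ∀ js : List α, (∀ i ∈ js, f i = g i) → js.findSome? f = js.findSome? g := by
  intro js
  induction js with
  | nil => intro _; rfl
  | cons j js ih =>
    intro h
    rw [List.findSome?_cons, List.findSome?_cons, h j List.mem_cons_self,
        ih (fun i hi => h i (List.mem_cons_of_mem _ hi))]

lemma F_eq_M (dct : List (String × List String)) (cs : List Char) :
    ∀ cands : List String, (∀ w ∈ cands, w.toList.length = cs.length) →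
      pvF dct cs cands (List.range cs.length) = pvM dct cs cands := by
  intro cands
  induction cands with
  | nil =>
    intro _
    rw [pvM]
    unfold pvF
    have : ∀ js : List Nat, js.findSome?
        (fun i => (pvInnerA dct cs i ([] : List String)).map (fun w => (i, w))) = none := by
      intro js
      induction js with
      | nil => rfl
      | cons j js ih => rw [List.findSome?_cons]; rw [show pvInnerA dct cs j ([] : List String) = none from rfl]; exact ih
    exact this _
  | cons w r ih =>
    intro hlen
    have hlenw : w.toList.length = cs.length := hlen w List.mem_cons_self
    have hlenr : ∀ u ∈ r, u.toList.length = cs.length :=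
      fun u hu => hlen u (List.mem_cons_of_mem _ hu)
    rw [pvM_cons]
    cases hg : pvGoodAt dct cs w with
    | none =>
      show pvF dct cs (w :: r) (List.range cs.length) = pvM dct cs r
      rw [← ih hlenr]
      apply findSome?_congr
      intro i hi
      have : pvInnerA dct cs i (w :: r) = pvInnerA dct cs i r := by
        rw [innerA_eq_find, innerA_eq_find]
        by_cases hlow : (cs.getD i ' ').toNat < 97 ∨ 122 < (cs.getD i ' ').toNat
        · rw [if_pos hlow, if_pos hlow]
        · rw [if_neg hlow, if_neg hlow]
          have hcw : ¬ pvCondA dct cs i w = true := by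
            intro hct
            have := (goodAt_iff dct cs w hlenw i).mpr ⟨⟨by omega, by omega⟩, hct⟩
            rw [hg] at this
            exact absurd this (by simp)
          rw [List.find?_cons_of_neg hcw]
      rw [this]
    | some p =>
      obtain ⟨hplow, hpcond⟩ := (goodAt_iff dct cs w hlenw p).mp hg
      have hpn : p < cs.length := (scan_unique cs w hlenw p (condA_scan dct cs w hlenw p hpcond)).1
      show pvF dct cs (w :: r) (List.range cs.length) = pvComb p w (pvM dct cs r)
      rw [← ih hlenr]
      unfold pvF
      apply findSome?_update p w
        (fun i => (pvInnerA dct cs i r).map (fun u => (i, u)))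
        (fun i => (pvInnerA dct cs i (w :: r)).map (fun u => (i, u)))
      · intro i q u hi
        cases hx : pvInnerA dct cs i r with
        | some x => rw [hx] at hi; injection hi with hi; exact (congrArg Prod.fst hi).symm
        | none => rw [hx] at hi; exact absurd hi (by simp)
      · exact List.pairwise_lt_range
      · exact List.mem_range.mpr hpn
      · intro i hi
        by_cases hip : i = p
        · subst hip
          rw [if_pos rfl, innerA_eq_find, if_neg (by omega),
              List.find?_cons_of_pos hpcond]
          rfl
        · rw [if_neg hip, innerA_eq_find, innerA_eq_find]
          by_cases hlow : (cs.getD i ' ').toNat < 97 ∨ 122 < (cs.getD i ' ').toNat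
          · rw [if_pos hlow, if_pos hlow]
          · rw [if_neg hlow, if_neg hlow]
            have hcw : ¬ pvCondA dct cs i w = true := by
              intro hct
              have := (goodAt_iff dct cs w hlenw i).mpr ⟨⟨by omega, by omega⟩, hct⟩
              rw [hg] at this
              injection this with this
              exact hip this.symm
            rw [List.find?_cons_of_neg hcw]

lemma M_skip (dct : List (String × List String)) (cs : List Char) :
    ∀ lst : List String,
      pvM dct cs lst = pvM dct cs (lst.filter (fun w => decide ((w.toList.length : Int) = (cs.length : Int)))) := by
  intro lst
  induction lst with
  | nil => rfl
  | cons w r ih =>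
    rw [List.filter_cons]
    by_cases hw : w.toList.length = cs.length
    · rw [if_pos (by rw [decide_eq_true_iff]; exact_mod_cast hw), pvM_cons, pvM_cons, ih]
    · rw [if_neg (by rw [decide_eq_true_iff, Nat.cast_inj]; exact hw), pvM_cons,
          show pvGoodAt dct cs w = none from by rw [pvGoodAt, if_neg hw]]
      exact ih

lemma outerA_eq (dct : List (String × List String)) (cs : List Char) (cands : List String) :
    ∀ js : List Nat,
      pvOuterA dct cs cands js =
        Option.map Prod.snd (pvF dct cs cands js) := by
  intro js
  induction js with
  | nil => rfl
  | cons i is ih =>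
    rw [pvOuterA]
    unfold pvF
    rw [List.findSome?_cons]
    cases hinner : pvInnerA dct cs i cands with
    | some w => rfl
    | none => exact ih

lemma main_eq (dct : List (String × List String)) (word : String) (lst : List String) :
    replace_with_adjacent dct word lst = replace_with_adjacent_alt dct word lst := by
  show (match pvOuterA dct word.toList
          (probable2 (word.toList.length : Int) lst) (List.range word.toList.length) with
        | some w => (true, w)
        | none => (false, "")) =
       (match pvFoldB dct word.toList lst none with
        | none => (false, "")
        | some (_, w) => (true, w))
  have hfil : probable2 (word.toList.length : Int) lst =
      lst.filter (fun w => decide ((w.toList.length : Int) = (word.toList.length : Int))) := by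
    rw [probable2]
    exact (PySem.List.foldl_append_ite_eq_filter
      (fun w : String => (w.toList.length : Int) = (word.toList.length : Int)) lst []).trans
      (List.nil_append _)
  have hlenf : ∀ u ∈ lst.filter
      (fun w => decide ((w.toList.length : Int) = (word.toList.length : Int))),
      u.toList.length = word.toList.length := by
    intro u hu
    have := (List.mem_filter.mp hu).2
    exact Nat.cast_inj.mp (of_decide_eq_true this)
  rw [hfil, outerA_eq, F_eq_M dct word.toList _ hlenf, foldB_eq,
      show pvMerge none (pvM dct word.toList lst) = pvM dct word.toList lst from rfl,
      M_skip dct word.toList lst]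
  cases pvM dct word.toList
      (lst.filter (fun w => decide ((w.toList.length : Int) = (word.toList.length : Int)))) with
  | none => rfl
  | some pw => obtain ⟨p, w⟩ := pw; rfl

-- ===== VERDICT (by name: the statement is the Claim_ definition above) =====
theorem replace_with_adjacent_spec : Claim_equal_replace_with_adjacent := by
  intro dct word lst _ _
  unfold Spec_replace_with_adjacent
  exact main_eq dct word lst
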